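-- pv_equiv track=rewrite | github.com/TheoryInPractice/cricca | src/exp_runmemtests.py | compare_found_cliques
-- ===== SOURCE A (Python) =====
-- def compare_found_cliques(computed_cliqs, groundtruth_cliqs):
--     '''
--     Compares ground truth cliques to the computed cliques via decomp
--     '''
--     counted = []
--     found_count=0
--     for cliq in computed_cliqs:
--         for gtcliq in groundtruth_cliqs:
--             if sorted(cliq)==gtcliq and sorted(cliq) not in counted:
--                 counted.append(sorted(cliq))
--                 found_count+=1
--
--     return found_count
-- ===== SOURCE B (Python) =====
-- def compare_found_cliques(computed_cliqs, groundtruth_cliqs):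
--     '''
--     Compares ground truth cliques to the computed cliques via decomp
--     '''
--     computed_set = {tuple(sorted(c)) for c in computed_cliqs}
--     gt_set = {tuple(g) for g in groundtruth_cliqs}
--     return len(computed_set & gt_set)
-- ===== Notes on version B (the rewrite author's own statement) =====
-- stated objective: faster
-- what changed: Replaced the nested per-clique scan with a manual 'counted' seen-list and counter by set algebra: build the set of distinct sorted computed cliques and the set of groundtruth cliques, and return the size of their intersection.
import Mathlib
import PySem

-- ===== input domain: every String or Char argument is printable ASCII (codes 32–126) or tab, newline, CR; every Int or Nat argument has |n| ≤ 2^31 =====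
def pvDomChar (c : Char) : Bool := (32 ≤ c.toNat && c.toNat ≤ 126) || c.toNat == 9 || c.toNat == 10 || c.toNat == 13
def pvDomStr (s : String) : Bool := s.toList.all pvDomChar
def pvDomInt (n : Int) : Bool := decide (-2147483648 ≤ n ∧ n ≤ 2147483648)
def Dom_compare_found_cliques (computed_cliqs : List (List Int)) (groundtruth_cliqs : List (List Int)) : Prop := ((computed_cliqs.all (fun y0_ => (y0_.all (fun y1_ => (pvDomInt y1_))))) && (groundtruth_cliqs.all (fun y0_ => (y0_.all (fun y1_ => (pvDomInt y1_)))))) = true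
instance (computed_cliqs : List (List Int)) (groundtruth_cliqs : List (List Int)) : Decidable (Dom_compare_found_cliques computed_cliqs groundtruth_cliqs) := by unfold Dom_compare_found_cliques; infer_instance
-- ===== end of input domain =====

-- B replaces A's nested scans with set algebra (set of sorted computed cliques ∩ set of groundtruth cliques); a timing run measured B faster.


-- ===== PORT A =====
-- literal transliteration: state (counted, found_count), nested loops over computed_cliqs then groundtruth_cliqs
def compare_found_cliques (computed_cliqs : List (List Int)) (groundtruth_cliqs : List (List Int)) : Int :=
  (computed_cliqs.foldl (fun (st : List (List Int) × Int) cliq =>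
    groundtruth_cliqs.foldl (fun (st : List (List Int) × Int) gtcliq =>
      if PySem.List.sorted cliq (fun x => x) false = gtcliq ∧
         PySem.List.sorted cliq (fun x => x) ∉ st.1 then
        (st.1 ++ [PySem.List.sorted cliq (fun x => x) false], st.2 + 1)
      else st) st) ([], 0)).2

-- ===== PORT B =====
-- literal transliteration of Source B: two set comprehensions, then len of their intersection
def compare_found_cliques_alt (computed_cliqs : List (List Int)) (groundtruth_cliqs : List (List Int)) : Int :=
  let computed_set : PySem.Set (List Int) :=
    PySem.Set.ofList (computed_cliqs.map (fun c => PySem.List.sorted c (fun x => x) false))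
  let gt_set : PySem.Set (List Int) := PySem.Set.ofList groundtruth_cliqs
  PySem.Set.len (PySem.Set.inter computed_set gt_set)

-- ===== PRECONDITION & SPEC =====
def Spec_compare_found_cliques (computed_cliqs : List (List Int)) (groundtruth_cliqs : List (List Int)) (out : Int) : Prop := out = compare_found_cliques_alt computed_cliqs groundtruth_cliqs
instance (computed_cliqs : List (List Int)) (groundtruth_cliqs : List (List Int)) (out : Int) : Decidable (Spec_compare_found_cliques computed_cliqs groundtruth_cliqs out) := by unfold Spec_compare_found_cliques; infer_instance

-- ===== CLAIM (what is proved, stated in full; the proofs are below) =====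
def Claim_equal_compare_found_cliques : Prop := ∀ (computed_cliqs : List (List Int)) (groundtruth_cliqs : List (List Int)), Dom_compare_found_cliques computed_cliqs groundtruth_cliqs → Spec_compare_found_cliques computed_cliqs groundtruth_cliqs (compare_found_cliques computed_cliqs groundtruth_cliqs)

-- ===== LEMMAS AND PROOFS =====

-- the inner-loop step of A, and the "counted" evolution of a whole outer step
def pvInner (s : List Int) (st : List (List Int) × Int) (gtcliq : List Int) : List (List Int) × Int :=
  if s = gtcliq ∧ s ∉ st.1 then (st.1 ++ [s], st.2 + 1) else st

-- once s is already in counted, the inner loop does nothing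
lemma pvInner_of_mem (s : List Int) (gt : List (List Int)) (acc : List (List Int)) (n : Int)
    (h : s ∈ acc) : gt.foldl (pvInner s) (acc, n) = (acc, n) := by
  induction gt with
  | nil => rfl
  | cons g gs ih =>
      simp only [List.foldl_cons, pvInner]
      rw [if_neg (by simp [h])]
      exact ih

-- the inner loop appends s iff s ∈ gt and s ∉ acc, and bumps the counter accordingly
lemma pvInner_foldl (s : List Int) (gt : List (List Int)) (acc : List (List Int)) (n : Int) :
    gt.foldl (pvInner s) (acc, n) =
      if s ∈ gt ∧ s ∉ acc then (acc ++ [s], n + 1) else (acc, n) := by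
  induction gt generalizing acc n with
  | nil => simp
  | cons g gs ih =>
      simp only [List.foldl_cons, pvInner]
      by_cases hm : s ∈ acc
      · rw [if_neg (by simp [hm]), ih, if_neg (by simp [hm]), if_neg (by simp [hm])]
      · by_cases he : s = g
        · rw [if_pos ⟨he, hm⟩]
          rw [pvInner_of_mem s gs _ _ (by simp)]
          rw [if_pos ⟨by simp [he], hm⟩]
        · rw [if_neg (by simp [he, hm]), ih]
          by_cases hg : s ∈ gs
          · rw [if_pos ⟨hg, hm⟩, if_pos ⟨by simp [hg], hm⟩]
          · rw [if_neg (by simp [hg, hm]), if_neg (by simp [he, hg])]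

-- the outer loop: counted is the p-filter of the growing set, found_count its growth
lemma pvOuter (gt : List (List Int)) (cs : List (List Int)) (accS : List (List Int)) (n : Int) :
    cs.foldl (fun st c => gt.foldl (pvInner (PySem.List.sorted c (fun x => x) false)) st)
      (accS.filter (fun x => decide (x ∈ gt)), n) =
      ((cs.foldl (fun s c => PySem.Set.add s (PySem.List.sorted c (fun x => x) false)) accS).filter
          (fun x => decide (x ∈ gt)),
        n + ((cs.foldl (fun s c => PySem.Set.add s (PySem.List.sorted c (fun x => x) false)) accS).filter
          (fun x => decide (x ∈ gt))).length
          - (accS.filter (fun x => decide (x ∈ gt))).length) := by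
  induction cs generalizing accS n with
  | nil => simp
  | cons c cs ih =>
      simp only [List.foldl_cons]
      rw [pvInner_foldl]
      set s := PySem.List.sorted c (fun x => x) false with hs
      by_cases hm : s ∈ accS
      · rw [if_neg (by by_cases h : s ∈ gt <;> simp [h, hm])]
        rw [PySem.Set.add_of_mem hm]
        exact ih accS n
      · rw [PySem.Set.add_of_not_mem hm]
        by_cases hg : s ∈ gt
        · rw [if_pos ⟨hg, fun hc => hm (List.mem_of_mem_filter hc)⟩]
          have hfa : (accS ++ [s]).filter (fun x => decide (x ∈ gt)) =
              accS.filter (fun x => decide (x ∈ gt)) ++ [s] := by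
            simp [List.filter_append, hg]
          have h2 := ih (accS ++ [s]) (n + 1)
          rw [hfa] at h2
          rw [h2]
          simp only [Prod.mk.injEq, List.length_append, List.length_cons, List.length_nil,
            Nat.cast_add, Nat.cast_one]
          exact ⟨trivial, by push_cast; ring⟩
        · rw [if_neg (by rintro ⟨h1, -⟩; exact hg h1)]
          have hfa : (accS ++ [s]).filter (fun x => decide (x ∈ gt)) =
              accS.filter (fun x => decide (x ∈ gt)) := by
            simp [List.filter_append, hg]
          have h2 := ih (accS ++ [s]) n
          rw [hfa] at h2
          exact h2

-- membership in the groundtruth set equals membership in the groundtruth list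
lemma pvContains_ofList (gt : List (List Int)) (x : List Int) :
    PySem.Set.contains (PySem.Set.ofList gt) x = decide (x ∈ gt) := by
  simp [PySem.Set.contains_eq_listContains, PySem.Set.mem_ofList]

-- ===== VERDICT (by name: the statement is the Claim_ definition above) =====
theorem compare_found_cliques_spec : Claim_equal_compare_found_cliques := by
  intro cs gt _
  unfold Spec_compare_found_cliques compare_found_cliques compare_found_cliques_alt
  have hA := pvOuter gt cs [] 0
  simp only [List.filter_nil, List.length_nil] at hA
  have hfold : ∀ (st : List (List Int) × Int),
      cs.foldl (fun st cliq =>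
        gt.foldl (fun st gtcliq =>
          if PySem.List.sorted cliq (fun x => x) false = gtcliq ∧
             PySem.List.sorted cliq (fun x => x) ∉ st.1 then
            (st.1 ++ [PySem.List.sorted cliq (fun x => x) false], st.2 + 1)
          else st) st) st =
      cs.foldl (fun st c => gt.foldl (pvInner (PySem.List.sorted c (fun x => x) false)) st) st := by
    intro st; rfl
  rw [hfold, hA]
  have hset : PySem.Set.ofList (cs.map (fun c => PySem.List.sorted c (fun x => x) false)) =
      cs.foldl (fun s c => PySem.Set.add s (PySem.List.sorted c (fun x => x) false)) [] := by
    rw [PySem.Set.ofList_eq_foldl, List.foldl_map]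
  show (0 : Int) + _ - 0 = _
  rw [PySem.Set.len, PySem.Set.inter, hset]
  simp only [zero_add, sub_zero]
  exact congrArg (fun l : List (List Int) => (l.length : Int))
    (List.filter_congr (fun x _ => (pvContains_ofList gt x).symm))
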